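-- pv_equiv track=rewrite | github.com/mwegrzyn/mappingTheEmotionalFace | experiment/app/shuffle.py | expressList
-- ===== SOURCE A (Python) =====
-- def expressList(n,r):
--     myList= []
--     j = 0
--     while j < r:
--         i = 0
--         while i < n:
--             myList.append(i)
--             i += 1
--         j += 1
--     return myList
-- ===== SOURCE B (Python) =====
-- def expressList(n, r):
--     # closed-form single pass: element k of the result is k mod n, over n*r items
--     if n <= 0 or r <= 0:
--         return []
--     return [k % n for k in range(n * r)]
-- ===== Notes on version B (the rewrite author's own statement) =====
-- stated objective: alternative
-- what changed: Replaces A's nested counter loops with a closed-form single flat pass: the k-th element of the n*r-long result is k mod n, so the block structure is computed by modular arithmetic instead of re-running an inner loop r times.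
import Mathlib
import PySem

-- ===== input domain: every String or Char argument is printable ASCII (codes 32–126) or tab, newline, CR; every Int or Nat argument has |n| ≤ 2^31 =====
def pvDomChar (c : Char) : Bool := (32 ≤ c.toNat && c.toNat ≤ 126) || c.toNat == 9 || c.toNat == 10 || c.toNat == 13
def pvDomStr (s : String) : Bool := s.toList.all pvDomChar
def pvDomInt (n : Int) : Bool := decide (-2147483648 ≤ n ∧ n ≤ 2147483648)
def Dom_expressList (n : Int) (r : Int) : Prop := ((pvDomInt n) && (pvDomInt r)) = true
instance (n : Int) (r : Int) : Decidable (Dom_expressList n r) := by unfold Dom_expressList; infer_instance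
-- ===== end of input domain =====

-- B computes the k-th element of the n*r-long result directly as k mod n in one flat pass,
-- replacing A's nested counter loops; objective: alternative (same cost, different algorithm).

-- ===== PORT A =====
-- inner 'while i < n: myList.append(i); i += 1' starting at i, returning the appended elements
def expressListInner (n : Int) (i : Int) : List Int :=
  if i < n then i :: expressListInner n (i + 1) else []
termination_by (n - i).toNat
decreasing_by omega

-- outer 'while j < r' loop carrying myList as accumulator
def expressListOuter (n : Int) (r : Int) (j : Int) (myList : List Int) : List Int :=
  if j < r then expressListOuter n r (j + 1) (myList ++ expressListInner n 0) else myList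
termination_by (r - j).toNat
decreasing_by omega

def expressList (n : Int) (r : Int) : List Int :=
  expressListOuter n r 0 []

-- ===== PORT B =====
-- if n <= 0 or r <= 0: return []; return [k % n for k in range(n * r)]
def expressList_alt (n : Int) (r : Int) : List Int :=
  if n ≤ 0 ∨ r ≤ 0 then []
  else (PySem.List.pyRange 0 (n * r) 1).map (fun k => PySem.Int.mod k n)

-- ===== PRECONDITION & SPEC =====
def Spec_expressList (n : Int) (r : Int) (out : List Int) : Prop := out = expressList_alt n r
instance (n : Int) (r : Int) (out : List Int) : Decidable (Spec_expressList n r out) := by unfold Spec_expressList; infer_instance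

-- ===== CLAIM =====
def Claim_equal_expressList : Prop := ∀ (n : Int) (r : Int), Dom_expressList n r → Spec_expressList n r (expressList n r)

-- ===== LEMMAS AND PROOFS =====

-- the inner loop from i is exactly range(i, n)
theorem expressListInner_eq_pyRange (n i : Int) :
    expressListInner n i = PySem.List.pyRange i n 1 := by
  rw [expressListInner]
  split
  · rename_i h
    rw [PySem.List.pyRange_one_cons h, expressListInner_eq_pyRange n (i + 1)]
  · rename_i h
    simp [PySem.List.pyRange_one, show (n - i).toNat = 0 by omega]
termination_by (n - i).toNat
decreasing_by omega

-- the outer loop appends (r - j).toNat copies of the block to the accumulator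
theorem expressListOuter_eq (n r : Int) (j : Int) (acc : List Int) :
    expressListOuter n r j acc
      = acc ++ (List.replicate (r - j).toNat (expressListInner n 0)).flatten := by
  rw [expressListOuter]
  split
  · rename_i h
    rw [expressListOuter_eq n r (j + 1)]
    have hr : (r - j).toNat = (r - (j + 1)).toNat + 1 := by omega
    rw [hr, List.replicate_succ, List.flatten_cons, List.append_assoc]
  · rename_i h
    simp [show (r - j).toNat = 0 by omega]
termination_by (r - j).toNat
decreasing_by omega

-- shifting a unit range by t is mapping (+ t)
theorem pyRange_shift (a b t : Int) :
    PySem.List.pyRange (a + t) (b + t) 1 = (PySem.List.pyRange a b 1).map (fun k => k + t) := by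
  rw [PySem.List.pyRange_one, PySem.List.pyRange_one, List.map_map]
  have : (b + t - (a + t)).toNat = (b - a).toNat := by omega
  rw [this]
  apply List.map_congr_left
  intro k _
  simp; omega

-- on [0, n) taking mod n is the identity
theorem map_mod_pyRange_id (n : Int) (hn : 0 < n) :
    (PySem.List.pyRange 0 n 1).map (fun k => PySem.Int.mod k n) = PySem.List.pyRange 0 n 1 := by
  conv_rhs => rw [← List.map_id (PySem.List.pyRange 0 n 1)]
  apply List.map_congr_left
  intro k hk
  rw [PySem.List.mem_pyRange_one] at hk
  rw [PySem.Int.mod_eq_emod_of_pos hn]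
  simp only [id]
  exact Int.emod_eq_of_lt hk.1 hk.2

-- the flat mod-pass over n*m items equals m concatenated copies of the base block
theorem map_mod_eq_flatten_replicate (n : Int) (hn : 0 < n) (m : Nat) :
    (PySem.List.pyRange 0 (n * m) 1).map (fun k => PySem.Int.mod k n)
      = (List.replicate m (PySem.List.pyRange 0 n 1)).flatten := by
  induction m with
  | zero => simp [PySem.List.pyRange_one]
  | succ m ih =>
    have h1 : (0 : Int) ≤ n := by omega
    have h2 : n ≤ n * (m + 1 : Nat) := by
      have : (1 : Int) ≤ (m + 1 : Nat) := by exact_mod_cast Nat.succ_le_succ (Nat.zero_le m)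
      nlinarith
    rw [PySem.List.pyRange_one_append 0 n (n * (m + 1 : Nat)) h1 h2, List.map_append,
        List.replicate_succ, List.flatten_cons, map_mod_pyRange_id n hn]
    congr 1
    have hshift : PySem.List.pyRange n (n * (m + 1 : Nat)) 1
        = (PySem.List.pyRange 0 (n * m) 1).map (fun k => k + n) := by
      have he : n * (m + 1 : Nat) = n * (m : Nat) + n := by push_cast; ring
      have hs := pyRange_shift 0 (n * m) n
      rw [he]
      simpa using hs
    rw [hshift, List.map_map, ← ih]
    apply List.map_congr_left
    intro k _
    simp only [Function.comp]
    rw [PySem.Int.mod_eq_emod_of_pos hn, PySem.Int.mod_eq_emod_of_pos hn]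
    exact Int.add_emod_right k n

-- ===== VERDICT =====
theorem expressList_spec : Claim_equal_expressList := by
  intro n r _
  unfold Spec_expressList expressList expressList_alt
  rw [expressListOuter_eq, expressListInner_eq_pyRange, show r - 0 = r by ring]
  split
  · rename_i h
    rcases h with h | h
    · rw [PySem.List.pyRange_one_eq_nil h]
      simp
    · rw [show r.toNat = 0 by omega]
      simp
  · rename_i h
    push Not at h
    obtain ⟨hn, hr⟩ := h
    rw [← map_mod_eq_flatten_replicate n hn r.toNat,
        show ((r.toNat : Int)) = r by omega]
    simp
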